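-- pv_equiv track=rewrite | github.com/brucehart/euler | problem57/problem57.py | count_expansions_with_more_digits
-- ===== SOURCE A (Python) =====
-- def count_expansions_with_more_digits(num_expansions):
--     """
--     Count the number of fraction expansions where the numerator has more digits than the denominator.
--
--     Parameters:
--         num_expansions (int): The number of expansions to consider.
--
--     Returns:
--         int: The count of expansions where the numerator has more digits.
--     """
--     count = 0
--     num, denom = 3, 2  # Starting with the first expansion (3/2)
--
--     for _ in range(1, num_expansions):
--         num, denom = num + 2 * denom, num + denom  # Generate the next fraction in the sequence
--         if len(str(num)) > len(str(denom)):  # Check if the numerator has more digits than the denominator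
--             count += 1  # Increment the count if the condition is met
--
--     return count
-- ===== SOURCE B (Python) =====
-- def count_expansions_with_more_digits(num_expansions):
--     """Count expansions of sqrt(2) whose numerator has more digits than the denominator.
--
--     Two staged passes over the half-Pell sequence: first build the list of
--     denominators d_0=1, d_1=2, d_k = 2*d_{k-1} + d_{k-2}; then count the
--     expansions beyond the first whose numerator d_k + d_{k-1} has more
--     digits than its denominator d_k.
--     """
--     ds = [1, 2]
--     for _ in range(1, num_expansions):
--         ds.append(2 * ds[-1] + ds[-2])
--     return sum(1 for k in range(2, len(ds))
--                if len(str(ds[k] + ds[k - 1])) > len(str(ds[k])))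
-- ===== Notes on version B (the rewrite author's own statement) =====
-- stated objective: alternative
-- what changed: B replaces A's single loop over (numerator, denominator) pairs by two staged passes over a single second-order half-Pell sequence: it first builds the list of denominators d_k = 2*d_{k-1} + d_{k-2}, then counts the indices where the numerator d_k + d_{k-1} has more digits than d_k.
import Mathlib
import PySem

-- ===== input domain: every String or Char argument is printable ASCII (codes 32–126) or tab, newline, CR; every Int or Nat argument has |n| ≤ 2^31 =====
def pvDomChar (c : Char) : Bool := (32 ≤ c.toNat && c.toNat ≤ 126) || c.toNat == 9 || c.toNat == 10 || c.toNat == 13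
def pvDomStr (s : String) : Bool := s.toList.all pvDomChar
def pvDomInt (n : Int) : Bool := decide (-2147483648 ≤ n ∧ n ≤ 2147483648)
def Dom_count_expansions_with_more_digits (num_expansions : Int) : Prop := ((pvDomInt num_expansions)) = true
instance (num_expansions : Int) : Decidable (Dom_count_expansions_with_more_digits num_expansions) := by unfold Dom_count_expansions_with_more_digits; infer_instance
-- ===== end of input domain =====

-- B restructures A's single pairwise loop into two staged passes over the half-Pell
-- denominator sequence d_k = 2*d_{k-1} + d_{k-2} (objective: alternative algorithm).

-- ===== PORT A =====
def pvStepA (s : Int × Int × Int) (_ : Int) : Int × Int × Int :=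
  (if PySem.Str.len (PySem.Int.toStr (s.2.1 + 2 * s.2.2)) >
      PySem.Str.len (PySem.Int.toStr (s.2.1 + s.2.2))
     then s.1 + 1 else s.1, s.2.1 + 2 * s.2.2, s.2.1 + s.2.2)

def count_expansions_with_more_digits (num_expansions : Int) : Int :=
  ((PySem.List.pyRange 1 num_expansions 1).foldl pvStepA (0, 3, 2)).1

-- ===== PORT B =====
-- ds.append(2 * ds[-1] + ds[-2]); ds is never empty so the defaults are unreachable
def pvStepBuild (ds : List Int) (_ : Int) : List Int :=
  ds ++ [2 * PySem.List.pyGetD ds (-1) 0 + PySem.List.pyGetD ds (-2) 0]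

def count_expansions_with_more_digits_alt (num_expansions : Int) : Int :=
  let ds := (PySem.List.pyRange 1 num_expansions 1).foldl pvStepBuild [1, 2]
  (PySem.List.pyRange 2 (ds.length : Int) 1).foldl
    (fun c k =>
      if PySem.Str.len (PySem.Int.toStr
            (PySem.List.pyGetD ds k 0 + PySem.List.pyGetD ds (k - 1) 0)) >
         PySem.Str.len (PySem.Int.toStr (PySem.List.pyGetD ds k 0))
      then c + 1 else c) 0

-- ===== PRECONDITION & SPEC =====
def Spec_count_expansions_with_more_digits (num_expansions : Int) (out : Int) : Prop := out = count_expansions_with_more_digits_alt num_expansions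
instance (num_expansions : Int) (out : Int) : Decidable (Spec_count_expansions_with_more_digits num_expansions out) := by unfold Spec_count_expansions_with_more_digits; infer_instance

-- ===== CLAIM (what is proved, stated in full; the proofs are below) =====
def Claim_equal_count_expansions_with_more_digits : Prop := ∀ (num_expansions : Int), Dom_count_expansions_with_more_digits num_expansions → Spec_count_expansions_with_more_digits num_expansions (count_expansions_with_more_digits num_expansions)

-- ===== LEMMAS AND PROOFS =====

-- the half-Pell denominators: 1, 2, 5, 12, 29, …
def pvD : ℕ → Int
  | 0 => 1
  | 1 => 2
  | (k + 2) => 2 * pvD (k + 1) + pvD k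

-- "the (j+2)-nd expansion's numerator has more digits than its denominator"
def pvCondN (j : ℕ) : Bool :=
  decide (PySem.Str.len (PySem.Int.toStr (pvD (j + 2) + pvD (j + 1))) >
          PySem.Str.len (PySem.Int.toStr (pvD (j + 2))))

-- count of digit-gaining expansions among indices j+2, …, j+r+1
def pvCntSeg : ℕ → ℕ → Int
  | _, 0 => 0
  | j, (r + 1) => (if pvCondN j then 1 else 0) + pvCntSeg (j + 1) r

theorem pvFoldA (l : List Int) : ∀ (c : Int) (j : ℕ),
    (l.foldl pvStepA (c, pvD (j + 1) + pvD j, pvD (j + 1))).1 = c + pvCntSeg j l.length := by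
  induction l with
  | nil => intro c j; simp [pvCntSeg]
  | cons x xs ih =>
    intro c j
    have hnum : (pvD (j + 1) + pvD j) + 2 * pvD (j + 1) = pvD (j + 2) + pvD (j + 1) := by
      show _ = 2 * pvD (j + 1) + pvD j + pvD (j + 1); ring
    have hden : (pvD (j + 1) + pvD j) + pvD (j + 1) = pvD (j + 2) := by
      show _ = 2 * pvD (j + 1) + pvD j; ring
    have hstep : pvStepA (c, pvD (j + 1) + pvD j, pvD (j + 1)) x
        = ((if pvCondN j then c + 1 else c), pvD (j + 2) + pvD (j + 1), pvD (j + 2)) := by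
      simp only [pvStepA, pvCondN, hnum, hden, decide_eq_true_eq]
    rw [List.foldl_cons, hstep, ih]
    simp only [List.length_cons, pvCntSeg]
    split_ifs <;> ring

theorem pvBuild (l : List Int) : ∀ (j : ℕ),
    l.foldl pvStepBuild ((List.range (j + 2)).map pvD) = (List.range (j + 2 + l.length)).map pvD := by
  induction l with
  | nil => intro j; simp
  | cons x xs ih =>
    intro j
    have hlen : ((List.range (j + 2)).map pvD).length = j + 2 := by simp
    have hstep : pvStepBuild ((List.range (j + 2)).map pvD) x = (List.range (j + 3)).map pvD := by
      unfold pvStepBuild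
      rw [PySem.List.pyGetD_neg_ofNat _ 1 0 (by omega) (by omega),
          PySem.List.pyGetD_neg_ofNat _ 2 0 (by omega) (by omega)]
      simp only [hlen]
      have h3 : (List.range (j + 3)) = List.range (j + 2) ++ [j + 2] := List.range_succ
      rw [h3, List.map_append]
      simp [pvD]
    rw [List.foldl_cons, hstep]
    have := ih (j + 1)
    have harith : j + 1 + 2 = j + 3 := by omega
    rw [harith] at this
    rw [this]
    congr 2
    simp only [List.length_cons]
    omega

theorem pvGet (N k : ℕ) (hk : k < N + 2) :
    PySem.List.pyGetD ((List.range (N + 2)).map pvD) ((k : ℕ) : Int) 0 = pvD k := by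
  rw [PySem.List.pyGetD_natCast]
  rw [List.getD_eq_getElem?_getD]
  simp [hk]

theorem pvFoldB (N : ℕ) : ∀ (r j : ℕ), j + r = N → ∀ (c : Int),
    ((PySem.List.pyRange ((j : Int) + 2) ((N : Int) + 2) 1).foldl
      (fun c k =>
        if PySem.Str.len (PySem.Int.toStr
              (PySem.List.pyGetD ((List.range (N + 2)).map pvD) k 0 +
               PySem.List.pyGetD ((List.range (N + 2)).map pvD) (k - 1) 0)) >
           PySem.Str.len (PySem.Int.toStr (PySem.List.pyGetD ((List.range (N + 2)).map pvD) k 0))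
        then c + 1 else c) c) = c + pvCntSeg j r := by
  intro r
  induction r with
  | zero =>
    intro j hj c
    subst hj
    rw [PySem.List.pyRange_one_eq_nil (by omega)]
    simp [pvCntSeg]
  | succ r ih =>
    intro j hj c
    rw [PySem.List.pyRange_one_cons (by omega : (j : Int) + 2 < (N : Int) + 2)]
    rw [List.foldl_cons]
    have e1 : ((j : Int) + 2) = ((j + 2 : ℕ) : Int) := by push_cast; ring
    have e2 : ((j : Int) + 2 - 1) = ((j + 1 : ℕ) : Int) := by push_cast; ring
    have g1 : PySem.List.pyGetD ((List.range (N + 2)).map pvD) ((j : Int) + 2) 0 = pvD (j + 2) := by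
      rw [e1]; exact pvGet N (j + 2) (by omega)
    have g2 : PySem.List.pyGetD ((List.range (N + 2)).map pvD) ((j : Int) + 2 - 1) 0 = pvD (j + 1) := by
      rw [e2]; exact pvGet N (j + 1) (by omega)
    simp only [g1, g2]
    have e3 : (j : Int) + 2 + 1 = ((j + 1 : ℕ) : Int) + 2 := by push_cast; ring
    rw [e3, ih (j + 1) (by omega)]
    simp only [pvCntSeg, pvCondN, decide_eq_true_eq]
    split_ifs <;> ring

-- ===== VERDICT (by name: the statement is the Claim_ definition above) =====
theorem count_expansions_with_more_digits_spec : Claim_equal_count_expansions_with_more_digits := by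
  intro n _
  show count_expansions_with_more_digits n = count_expansions_with_more_digits_alt n
  unfold count_expansions_with_more_digits count_expansions_with_more_digits_alt
  set l := PySem.List.pyRange 1 n 1 with hl
  set m := l.length with hm
  -- A side
  have hinit : ((0 : Int), (3 : Int), (2 : Int)) = (0, pvD 1 + pvD 0, pvD 1) := by
    norm_num [pvD]
  have hA : (l.foldl pvStepA (0, 3, 2)).1 = 0 + pvCntSeg 0 m := by
    rw [hinit]; exact pvFoldA l 0 0
  -- B side
  have hds0 : ([1, 2] : List Int) = (List.range (0 + 2)).map pvD := by
    simp [List.range_succ, pvD]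
  have hds : l.foldl pvStepBuild [1, 2] = (List.range (m + 2)).map pvD := by
    rw [hds0, pvBuild l 0]
    congr 2
    omega
  rw [hA, hds]
  simp only [List.length_map, List.length_range]
  exact (pvFoldB m m 0 (by omega) 0).symm
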